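-- pv_equiv track=rewrite | github.com/tavares2401ryan-lab/TrabalhosPSI | Gerados de senhas.py | gerar_password
-- ===== SOURCE A (Python) =====
-- def gerar_sigla(frase):
--     sigla = ""
--     nova_palavra = True
--
--     for letra in frase:
--         if nova_palavra == True and letra.isalpha():
--             sigla = sigla + letra.upper()
--             nova_palavra = False
--
--         if letra == " ":
--             nova_palavra = True
--
--     return sigla
--
-- def gerar_password(nome, ano, frase):
--     password = ""
--     contador = 0
--
--     # Alterna maiúsculas e minúsculas no nome
--     for letra in nome:
--         if letra.isalpha():
--             if contador % 2 == 0: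
--                 password = password + letra.upper()
--             else:
--                 password = password + letra.lower()
--             contador = contador + 1
--
--     # Adiciona sigla da frase
--     sigla = gerar_sigla(frase)
--     password = password + sigla
--
--     # Adiciona os números do ano
--     for numero in ano:
--         password = password + numero
--
--     return password
-- ===== SOURCE B (Python) =====
-- def gerar_password(nome, ano, frase):
--     letras = [c for c in nome if c.isalpha()]
--     parte_nome = "".join(c.upper() if i % 2 == 0 else c.lower() for i, c in enumerate(letras))
--     sigla = "".join(next((c.upper() for c in seg if c.isalpha()), "") for seg in frase.split(" "))
--     resto = "".join(n for n in ano)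
--     return parte_nome + sigla + resto
-- ===== Notes on version B (the rewrite author's own statement) =====
-- stated objective: idiomatic
-- what changed: The char-by-char flag scan for the acronym is replaced by splitting the phrase on spaces and taking each segment's first alphabetic character, and the name alternation becomes filter+enumerate with join instead of a stateful concatenation loop.
import Mathlib
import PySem

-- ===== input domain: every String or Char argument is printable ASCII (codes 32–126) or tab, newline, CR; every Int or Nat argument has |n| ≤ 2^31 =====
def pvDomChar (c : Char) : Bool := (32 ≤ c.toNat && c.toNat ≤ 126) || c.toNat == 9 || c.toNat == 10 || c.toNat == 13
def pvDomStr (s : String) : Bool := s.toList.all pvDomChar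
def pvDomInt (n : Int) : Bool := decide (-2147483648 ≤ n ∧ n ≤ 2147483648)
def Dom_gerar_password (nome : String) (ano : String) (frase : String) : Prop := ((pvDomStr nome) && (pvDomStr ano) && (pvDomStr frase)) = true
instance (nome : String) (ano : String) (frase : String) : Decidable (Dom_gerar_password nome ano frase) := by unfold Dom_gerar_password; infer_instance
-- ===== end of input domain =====

-- B replaces A's stateful flag/counter concatenation loops by a split-on-space acronym pass
-- and a filter+enumerate name pass (idiomatic decomposition; return value only).

-- ===== PORT A =====
-- one step of A's gerar_sigla loop: state = (sigla, nova_palavra)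
def pvSiglaStepA (st : List Char × Bool) (letra : Char) : List Char × Bool :=
  let st1 := if st.2 && PySem.Chars.isalpha letra then
               (st.1 ++ [PySem.Chars.upperChar letra], false) else st
  if letra = ' ' then (st1.1, true) else st1

def gerar_sigla (frase : List Char) : List Char :=
  (frase.foldl pvSiglaStepA ([], true)).1

-- one step of A's name loop: state = (password, contador)
def pvNameStepA (st : List Char × Int) (letra : Char) : List Char × Int :=
  if PySem.Chars.isalpha letra then
    (st.1 ++ [if PySem.Int.mod st.2 2 = 0 then PySem.Chars.upperChar letra
              else PySem.Chars.lowerChar letra], st.2 + 1)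
  else st

def gerar_password (nome : String) (ano : String) (frase : String) : String :=
  let st := nome.toList.foldl pvNameStepA ([], 0)
  let password := st.1 ++ gerar_sigla frase.toList
  String.mk (ano.toList.foldl (fun p numero => p ++ [numero]) password)

-- ===== PORT B =====
-- next((c.upper() for c in seg if c.isalpha()), "") as a List Char (empty = no alpha char)
def pvFirstAlphaUpper : List Char → List Char
  | [] => []
  | c :: cs => if PySem.Chars.isalpha c then [PySem.Chars.upperChar c] else pvFirstAlphaUpper cs

def gerar_password_alt (nome : String) (ano : String) (frase : String) : String :=
  let letras := nome.toList.filter (fun c => PySem.Chars.isalpha c)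
  let parte_nome := (PySem.List.enumerate letras).map
    (fun p => if PySem.Int.mod p.1 2 = 0 then PySem.Chars.upperChar p.2
              else PySem.Chars.lowerChar p.2)
  let sigla := (PySem.Chars.splitOn frase.toList [' ']).flatMap pvFirstAlphaUpper
  String.mk (parte_nome ++ sigla ++ ano.toList)

-- ===== PRECONDITION & SPEC =====
def Spec_gerar_password (nome : String) (ano : String) (frase : String) (out : String) : Prop := out = gerar_password_alt nome ano frase
instance (nome : String) (ano : String) (frase : String) (out : String) : Decidable (Spec_gerar_password nome ano frase out) := by unfold Spec_gerar_password; infer_instance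

-- ===== CLAIM (what is proved, stated in full; the proofs are below) =====
def Claim_equal_gerar_password : Prop := ∀ (nome : String) (ano : String) (frase : String), Dom_gerar_password nome ano frase → Spec_gerar_password nome ano frase (gerar_password nome ano frase)

-- ===== LEMMAS AND PROOFS =====

-- common recursive description of the acronym (first alpha of each space-separated segment)
def pvSiglaRec : Bool → List Char → List Char
  | _, [] => []
  | flag, c :: cs =>
    if flag && PySem.Chars.isalpha c then PySem.Chars.upperChar c :: pvSiglaRec false cs
    else if c = ' ' then pvSiglaRec true cs
    else pvSiglaRec flag cs

lemma pvSiglaA_eq : ∀ (cs : List Char) (acc : List Char) (flag : Bool),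
    (cs.foldl pvSiglaStepA (acc, flag)).1 = acc ++ pvSiglaRec flag cs := by
  intro cs
  induction cs with
  | nil => intro acc flag; simp [pvSiglaRec]
  | cons c cs ih =>
    intro acc flag
    by_cases hsp : c = ' '
    · subst hsp
      have : PySem.Chars.isalpha ' ' = false := by decide
      simp [List.foldl_cons, pvSiglaStepA, pvSiglaRec, this, ih]
    · by_cases ha : (flag && PySem.Chars.isalpha c) = true
      · simp [List.foldl_cons, pvSiglaStepA, pvSiglaRec, hsp, ha, ih]
      · simp [List.foldl_cons, pvSiglaStepA, pvSiglaRec, hsp, ha, ih]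

-- simple split-on-single-space recursion, with the running (reversed) current word
def pvSplitAux : List Char → List Char → List (List Char)
  | [], cur => [cur.reverse]
  | c :: rest, cur =>
    if c = ' ' then cur.reverse :: pvSplitAux rest [] else pvSplitAux rest (c :: cur)

lemma pvGo_eq : ∀ (fuel : Nat) (l cur : List Char) (acc : List (List Char)),
    l.length ≤ fuel →
    PySem.Chars.splitOn.go [' '] fuel l cur acc = acc.reverse ++ pvSplitAux l cur := by
  intro fuel
  induction fuel with
  | zero =>
    intro l cur acc h
    have : l = [] := List.length_eq_zero_iff.mp (Nat.le_zero.mp h)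
    subst this
    simp [PySem.Chars.splitOn.go, pvSplitAux]
  | succ n ih =>
    intro l cur acc h
    cases l with
    | nil => simp [PySem.Chars.splitOn.go, pvSplitAux]
    | cons c rest =>
      have hlen : rest.length ≤ n := by simpa using Nat.lt_succ_iff.mp (by simpa using h)
      by_cases hsp : c = ' '
      · subst hsp
        have hpre : [' '].isPrefixOf (' ' :: rest) = true := by simp [List.isPrefixOf]
        rw [PySem.Chars.splitOn.go]
        simp only [hpre, if_true, List.length_singleton, List.drop_one, List.tail_cons]
        rw [ih rest [] (cur.reverse :: acc) hlen]
        simp [pvSplitAux]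
      · have hpre : [' '].isPrefixOf (c :: rest) = false := by
          simp [List.isPrefixOf]; exact fun h' => hsp h'.symm
        rw [PySem.Chars.splitOn.go]
        simp only [hpre, Bool.false_eq_true, if_false]
        rw [ih rest (c :: cur) acc hlen]
        simp [pvSplitAux, hsp]

lemma pvFirstAlphaUpper_append (xs ys : List Char) :
    pvFirstAlphaUpper (xs ++ ys) =
      if xs.any (fun c => PySem.Chars.isalpha c) then pvFirstAlphaUpper xs
      else pvFirstAlphaUpper ys := by
  induction xs with
  | nil => simp
  | cons x xs ih =>
    by_cases hx : PySem.Chars.isalpha x = true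
    · simp [pvFirstAlphaUpper, hx]
    · simp [pvFirstAlphaUpper, hx, ih]

lemma pvFirstAlphaUpper_of_none {xs : List Char}
    (h : xs.any (fun c => PySem.Chars.isalpha c) = false) : pvFirstAlphaUpper xs = [] := by
  induction xs with
  | nil => rfl
  | cons x xs ih =>
    simp only [List.any_cons, Bool.or_eq_false_iff] at h
    simp [pvFirstAlphaUpper, h.1, ih h.2]

lemma pvFlatMap_splitAux : ∀ (l cur : List Char),
    (pvSplitAux l cur).flatMap pvFirstAlphaUpper =
      if cur.any (fun c => PySem.Chars.isalpha c) then
        pvFirstAlphaUpper cur.reverse ++ pvSiglaRec false l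
      else pvSiglaRec true l := by
  intro l
  induction l with
  | nil =>
    intro cur
    by_cases hc : cur.any (fun c => PySem.Chars.isalpha c) = true
    · simp [pvSplitAux, pvSiglaRec, hc]
    · have := pvFirstAlphaUpper_of_none (xs := cur.reverse) (by
        simpa [List.any_reverse] using Bool.eq_false_iff.mpr (fun h => hc h))
      simp only [Bool.not_eq_true] at hc
      simp [pvSplitAux, pvSiglaRec, hc, this]
  | cons c rest ih =>
    intro cur
    by_cases hsp : c = ' '
    · subst hsp
      have hna : PySem.Chars.isalpha ' ' = false := by decide
      have h0 := ih []
      simp only [List.any_nil, Bool.false_eq_true, if_false] at h0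
      by_cases hc : cur.any (fun c => PySem.Chars.isalpha c) = true
      · simp [pvSplitAux, pvSiglaRec, hna, hc, h0]
      · simp only [Bool.not_eq_true] at hc
        have hnone := pvFirstAlphaUpper_of_none (xs := cur.reverse)
          (by simpa [List.any_reverse] using hc)
        simp [pvSplitAux, pvSiglaRec, hna, hc, h0, hnone]
    · by_cases ha : PySem.Chars.isalpha c = true
      · have h1 := ih (c :: cur)
        by_cases hc : cur.any (fun c => PySem.Chars.isalpha c) = true
        · have happ := pvFirstAlphaUpper_append cur.reverse [c]
          simp only [List.any_reverse, hc, if_true] at happ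
          simp [pvSplitAux, pvSiglaRec, hsp, ha, hc, h1, happ]
        · simp only [Bool.not_eq_true] at hc
          have hnone := pvFirstAlphaUpper_of_none (xs := cur.reverse)
            (by simpa [List.any_reverse] using hc)
          have happ := pvFirstAlphaUpper_append cur.reverse [c]
          simp only [List.any_reverse, hc, Bool.false_eq_true, if_false] at happ
          simp [pvSplitAux, pvSiglaRec, hsp, ha, hc, h1, happ, pvFirstAlphaUpper]
      · have h1 := ih (c :: cur)
        by_cases hc : cur.any (fun c => PySem.Chars.isalpha c) = true
        · have happ := pvFirstAlphaUpper_append cur.reverse [c]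
          simp only [List.any_reverse, hc, if_true] at happ
          simp [pvSplitAux, pvSiglaRec, hsp, ha, hc, h1, happ]
        · simp only [Bool.not_eq_true] at hc
          simp [pvSplitAux, pvSiglaRec, hsp, ha, hc, h1]

-- the two acronym computations agree
lemma pvSigla_eq (frase : List Char) :
    gerar_sigla frase = (PySem.Chars.splitOn frase [' ']).flatMap pvFirstAlphaUpper := by
  unfold gerar_sigla PySem.Chars.splitOn
  rw [pvSiglaA_eq frase [] true, pvGo_eq (frase.length + 1) frase [] [] (Nat.le_succ _)]
  simp [pvFlatMap_splitAux]

-- A's name loop = map over enumerate of the alphabetic characters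
lemma pvName_eq : ∀ (cs : List Char) (acc : List Char) (k : Int),
    cs.foldl pvNameStepA (acc, k) =
      (acc ++ (PySem.List.enumerate (cs.filter (fun c => PySem.Chars.isalpha c)) k).map
        (fun p => if PySem.Int.mod p.1 2 = 0 then PySem.Chars.upperChar p.2
                  else PySem.Chars.lowerChar p.2),
       k + (cs.filter (fun c => PySem.Chars.isalpha c)).length) := by
  intro cs
  induction cs with
  | nil => intro acc k; simp
  | cons c cs ih =>
    intro acc k
    by_cases ha : PySem.Chars.isalpha c = true
    · simp only [List.foldl_cons, pvNameStepA, ha, if_true]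
      rw [ih]
      simp [ha, PySem.List.enumerate_cons]
      omega
    · simp only [List.foldl_cons, pvNameStepA, ha, Bool.false_eq_true, if_false]
      rw [ih]
      simp [ha]

-- ===== VERDICT (by name: the statement is the Claim_ definition above) =====
theorem gerar_password_spec : Claim_equal_gerar_password := by
  intro nome ano frase _
  unfold Spec_gerar_password
  simp only [gerar_password, gerar_password_alt]
  rw [PySem.List.foldl_append_singleton, pvName_eq nome.toList [] 0, pvSigla_eq]
  simp
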